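-- pv_equiv track=rewrite | github.com/a-r-r-o-w/stablefused | stablefused/diffusion/inpaint_diffusion.py | _calculate_translation_per_frame
-- ===== SOURCE A (Python) =====
-- from typing import Any, List, Optional, Tuple, Union
--
-- def _calculate_translation_per_frame(
--     translation: int,
--     translation_frames: int,
-- ) -> List[int]:
--     """Helper function to calculate translation per frame."""
--     step_size = translation // translation_frames
--     remainder = translation % translation_frames
--     values = [step_size + (i < remainder) for i in range(translation_frames)]
--     return values
-- ===== SOURCE B (Python) =====
-- from typing import List
--
-- def _calculate_translation_per_frame(
--     translation: int,
--     translation_frames: int,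
-- ) -> List[int]:
--     """Greedy: repeatedly hand out the ceiling of what remains per remaining frame."""
--     values = []
--     remaining = translation
--     remaining_frames = translation_frames
--     while remaining_frames > 0:
--         v = -(-remaining // remaining_frames)
--         values.append(v)
--         remaining -= v
--         remaining_frames -= 1
--     return values
-- ===== Notes on version B (the rewrite author's own statement) =====
-- stated objective: alternative
-- what changed: Replaces the precomputed quotient/remainder comprehension by a greedy loop that repeatedly gives the next frame the ceiling of the remaining translation over the remaining frames.
import Mathlib
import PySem

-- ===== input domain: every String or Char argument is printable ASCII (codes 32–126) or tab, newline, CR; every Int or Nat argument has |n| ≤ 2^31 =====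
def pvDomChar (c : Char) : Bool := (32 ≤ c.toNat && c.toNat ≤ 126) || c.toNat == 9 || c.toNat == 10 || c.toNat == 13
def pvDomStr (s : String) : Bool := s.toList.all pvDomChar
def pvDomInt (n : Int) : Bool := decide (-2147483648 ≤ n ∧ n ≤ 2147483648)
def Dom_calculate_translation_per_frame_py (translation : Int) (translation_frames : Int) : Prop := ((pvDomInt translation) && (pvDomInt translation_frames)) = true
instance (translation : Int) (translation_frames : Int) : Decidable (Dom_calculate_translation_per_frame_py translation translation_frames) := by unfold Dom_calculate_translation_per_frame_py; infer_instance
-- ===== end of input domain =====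

-- B replaces the quotient/remainder comprehension by a greedy loop handing each frame
-- the ceiling of the remaining translation over the remaining frames (alternative decomposition).

-- ===== PORT A =====
def calculate_translation_per_frame_py (translation : Int) (translation_frames : Int) : List Int :=
  let step_size := PySem.Int.floordiv translation translation_frames
  let remainder := PySem.Int.mod translation translation_frames
  (PySem.List.pyRange 0 translation_frames 1).map
    (fun i => step_size + (if i < remainder then 1 else 0))

-- ===== PORT B =====
-- the while loop runs exactly translation_frames.toNat times (remaining_frames
-- decreases by 1 each turn); fuel = that count, with the loop guard kept as in Source B
def calculate_translation_per_frame_py_alt_go (fuel : Nat) (remaining remaining_frames : Int) : List Int :=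
  match fuel with
  | 0 => []
  | n + 1 =>
    if remaining_frames > 0 then
      let v := -(PySem.Int.floordiv (-remaining) remaining_frames)
      v :: calculate_translation_per_frame_py_alt_go n (remaining - v) (remaining_frames - 1)
    else []

def calculate_translation_per_frame_py_alt (translation : Int) (translation_frames : Int) : List Int :=
  calculate_translation_per_frame_py_alt_go translation_frames.toNat translation translation_frames

-- ===== PRECONDITION & SPEC =====
-- Pre_ excludes exactly translation_frames = 0, where A raises ZeroDivisionError.
def Pre_calculate_translation_per_frame_py (translation : Int) (translation_frames : Int) : Prop :=
  translation_frames ≠ 0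
instance (translation : Int) (translation_frames : Int) : Decidable (Pre_calculate_translation_per_frame_py translation translation_frames) := by unfold Pre_calculate_translation_per_frame_py; infer_instance

def pvWitness_calculate_translation_per_frame_py : Int × Int := (7, 3)

def Spec_calculate_translation_per_frame_py (translation : Int) (translation_frames : Int) (out : List Int) : Prop := out = calculate_translation_per_frame_py_alt translation translation_frames
instance (translation : Int) (translation_frames : Int) (out : List Int) : Decidable (Spec_calculate_translation_per_frame_py translation translation_frames out) := by unfold Spec_calculate_translation_per_frame_py; infer_instance

-- ===== CLAIM (what is proved, stated in full; the proofs are below) =====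
def Claim_equal_calculate_translation_per_frame_py : Prop := ∀ (translation : Int) (translation_frames : Int), Dom_calculate_translation_per_frame_py translation translation_frames → Pre_calculate_translation_per_frame_py translation translation_frames → Spec_calculate_translation_per_frame_py translation translation_frames (calculate_translation_per_frame_py translation translation_frames)

-- ===== LEMMAS AND PROOFS =====

-- the greedy loop, started at fuel = rf = n with remaining = s*n + r (0 ≤ r ≤ n),
-- yields exactly A's distribution: s+1 for the first r frames, s afterwards
theorem altGo_eq (n : Nat) : ∀ (s r : Int), 0 ≤ r → r ≤ (n : Int) →
    calculate_translation_per_frame_py_alt_go n (s * n + r) n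
      = (List.range n).map (fun (k : Nat) => s + if (k : Int) < r then 1 else 0) := by
  induction n with
  | zero => intro s r h0 h1; simp [calculate_translation_per_frame_py_alt_go]
  | succ n ih =>
    intro s r h0 h1
    have hc : ((n + 1 : Nat) : Int) = (n : Int) + 1 := by push_cast; ring
    rw [hc] at h1 ⊢
    have hpos : ((n : Int) + 1) > 0 := by positivity
    simp only [calculate_translation_per_frame_py_alt_go, if_pos hpos]
    have hv : -(PySem.Int.floordiv (-(s * ((n : Int) + 1) + r)) ((n : Int) + 1))
        = s + (if 0 < r then 1 else 0) := by
      rw [PySem.Int.neg_floordiv_neg_eq_iff_of_pos hpos]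
      constructor
      · split_ifs with h <;> nlinarith
      · split_ifs with h <;> nlinarith
    rw [hv]
    have harg : s * ((n : Int) + 1) + r - (s + (if 0 < r then 1 else 0))
        = s * (n : Int) + (r - (if 0 < r then 1 else 0)) := by ring
    have harg2 : (n : Int) + 1 - 1 = (n : Int) := by ring
    rw [harg, harg2, ih s (r - (if 0 < r then 1 else 0))
        (by split_ifs with h <;> omega) (by split_ifs with h <;> omega)]
    rw [List.range_succ_eq_map, List.map_cons, List.map_map]
    refine congrArg₂ List.cons ?_ ?_
    · norm_num
    · refine List.map_congr_left ?_
      intro k _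
      simp only [Function.comp_apply]
      push_cast
      split_ifs with h h2 h3 <;> omega

theorem calculate_translation_per_frame_py_spec : Claim_equal_calculate_translation_per_frame_py := by
  intro t f _ hf
  unfold Spec_calculate_translation_per_frame_py
  unfold calculate_translation_per_frame_py calculate_translation_per_frame_py_alt
  rcases lt_or_gt_of_ne hf with hneg | hpos
  · -- f < 0 : A's range is empty, B's fuel is 0
    have h1 : f.toNat = 0 := Int.toNat_of_nonpos (le_of_lt hneg)
    rw [h1, PySem.List.pyRange_one_eq_nil (by omega)]
    simp [calculate_translation_per_frame_py_alt_go]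
  · -- f > 0
    set s := PySem.Int.floordiv t f with hs
    set r := PySem.Int.mod t f with hr
    have ht : s * f + r = t := PySem.Int.floordiv_mul_add_mod t f
    have hre : r = t % f := PySem.Int.mod_eq_emod_of_pos hpos
    have hr0 : 0 ≤ r := hre ▸ Int.emod_nonneg t (by omega)
    have hrf : r < f := hre ▸ Int.emod_lt_of_pos t hpos
    have hfn : ((f.toNat : Int)) = f := Int.toNat_of_nonneg (le_of_lt hpos)
    rw [PySem.List.pyRange_one, List.map_map]
    have key := altGo_eq f.toNat s r hr0 (by omega)
    rw [hfn, ht] at key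
    rw [key]
    have hz : (f - 0).toNat = f.toNat := by norm_num
    rw [hz]
    apply List.map_congr_left
    intro k _
    simp
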